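-- pv_equiv track=rewrite | github.com/adityakaria/5-Sem | sc/lab4 (genetic-algorithm)/test/new.py | featureSelection
-- ===== SOURCE A (Python) =====
-- def featureSelection(start, classColumn, dataset, chromosome):
--     datasetSelectedFeatures = []
--     for j in range(len(dataset)):
--         dataList = []
--         for i in range(len(chromosome)):
--             if chromosome[i] == 1:
--                 dataList.append(dataset[j][start+i])
--         dataList.append(dataset[j][classColumn])
--         datasetSelectedFeatures.append(dataList)
--     return datasetSelectedFeatures
-- ===== SOURCE B (Python) =====
-- def featureSelection(start, classColumn, dataset, chromosome):
--     # Column-major: grow all output rows in parallel, one selected column at a time.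
--     rows = [[] for _ in dataset]
--     for i in range(len(chromosome)):
--         if chromosome[i] == 1:
--             for r, row in zip(rows, dataset):
--                 r.append(row[start + i])
--     for r, row in zip(rows, dataset):
--         r.append(row[classColumn])
--     return rows
-- ===== Notes on version B (the rewrite author's own statement) =====
-- stated objective: alternative
-- what changed: B swaps the loop nesting: instead of building each output row by scanning the chromosome per row, it keeps all output rows as parallel accumulators and appends one selected column across every row at a time (column-major construction), then appends the class column across all rows.
import Mathlib
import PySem

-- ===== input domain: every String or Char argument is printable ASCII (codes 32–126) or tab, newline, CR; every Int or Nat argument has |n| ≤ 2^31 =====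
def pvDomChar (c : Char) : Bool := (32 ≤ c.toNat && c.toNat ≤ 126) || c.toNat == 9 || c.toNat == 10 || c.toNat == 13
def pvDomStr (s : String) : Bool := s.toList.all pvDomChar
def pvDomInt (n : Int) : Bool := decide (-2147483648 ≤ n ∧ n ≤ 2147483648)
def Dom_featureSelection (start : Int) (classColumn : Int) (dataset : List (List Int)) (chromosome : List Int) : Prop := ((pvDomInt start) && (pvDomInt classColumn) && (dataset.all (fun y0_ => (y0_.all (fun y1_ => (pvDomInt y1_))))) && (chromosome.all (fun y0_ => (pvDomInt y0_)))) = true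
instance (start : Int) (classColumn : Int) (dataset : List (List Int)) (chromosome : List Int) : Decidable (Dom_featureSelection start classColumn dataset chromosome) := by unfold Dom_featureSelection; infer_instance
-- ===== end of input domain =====

-- B builds the output column-major (loops swapped: all output rows grow in parallel, one selected column at a time); alternative decomposition, same result.


-- ===== PORT A =====
-- indexing is ported with pyGetD; Pre_ guarantees every index performed is in range, where pyGetD = Python indexing exactly
def featureSelection (start : Int) (classColumn : Int) (dataset : List (List Int)) (chromosome : List Int) : List (List Int) :=
  (PySem.List.pyRange 0 (dataset.length : Int) 1).foldl (fun acc j =>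
    let row := PySem.List.pyGetD dataset j []
    let dataList := (PySem.List.pyRange 0 (chromosome.length : Int) 1).foldl (fun dl i =>
      if PySem.List.pyGetD chromosome i 0 = 1 then dl ++ [PySem.List.pyGetD row (start + i) 0] else dl) []
    acc ++ [dataList ++ [PySem.List.pyGetD row classColumn 0]]) []

-- ===== PORT B =====
-- column-major construction: rows are parallel accumulators; zip(rows, dataset) is List.zip
def featureSelection_alt (start : Int) (classColumn : Int) (dataset : List (List Int)) (chromosome : List Int) : List (List Int) :=
  let rows0 : List (List Int) := dataset.map (fun _ => ([] : List Int))
  let rows := (PySem.List.pyRange 0 (chromosome.length : Int) 1).foldl (fun rows i =>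
    if PySem.List.pyGetD chromosome i 0 = 1 then
      (rows.zip dataset).map (fun p => p.1 ++ [PySem.List.pyGetD p.2 (start + i) 0])
    else rows) rows0
  (rows.zip dataset).map (fun p => p.1 ++ [PySem.List.pyGetD p.2 classColumn 0])

-- ===== PRECONDITION & SPEC =====
-- Pre_ excludes exactly the inputs on which the Python A raises IndexError: some row too short for the
-- class column or for a selected feature column start+i.
def Pre_featureSelection (start : Int) (classColumn : Int) (dataset : List (List Int)) (chromosome : List Int) : Prop :=
  ∀ row ∈ dataset, PySem.Raise.InRange row.length classColumn ∧
    ∀ i ∈ PySem.List.pyRange 0 (chromosome.length : Int) 1,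
      PySem.List.pyGetD chromosome i 0 = 1 → PySem.Raise.InRange row.length (start + i)
instance (start : Int) (classColumn : Int) (dataset : List (List Int)) (chromosome : List Int) : Decidable (Pre_featureSelection start classColumn dataset chromosome) := by unfold Pre_featureSelection; infer_instance
def pvWitness_featureSelection : Int × Int × List (List Int) × List Int := (1, 0, [[7, 3, 4], [8, 5, 6]], [1, 0])

def Spec_featureSelection (start : Int) (classColumn : Int) (dataset : List (List Int)) (chromosome : List Int) (out : List (List Int)) : Prop := out = featureSelection_alt start classColumn dataset chromosome
instance (start : Int) (classColumn : Int) (dataset : List (List Int)) (chromosome : List Int) (out : List (List Int)) : Decidable (Spec_featureSelection start classColumn dataset chromosome out) := by unfold Spec_featureSelection; infer_instance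

-- ===== CLAIM (what is proved, stated in full; the proofs are below) =====
def Claim_equal_featureSelection : Prop := ∀ (start : Int) (classColumn : Int) (dataset : List (List Int)) (chromosome : List Int), Dom_featureSelection start classColumn dataset chromosome → Pre_featureSelection start classColumn dataset chromosome → Spec_featureSelection start classColumn dataset chromosome (featureSelection start classColumn dataset chromosome)

-- ===== LEMMAS AND PROOFS =====

-- zip of a mapped copy of l with l itself is a single map over l
lemma zip_map_self {α β : Type} (l : List α) (f : α → β) :
    (l.map f).zip l = l.map (fun x => (f x, x)) := by
  induction l with
  | nil => simp
  | cons x l ih => simp [ih]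

-- the column-major fold over parallel row accumulators equals a per-row fold
lemma col_major_eq (dataset : List (List Int)) (cond : Int → Prop) [DecidablePred cond]
    (val : List Int → Int → Int) (L : List Int) (f : List Int → List Int) :
    L.foldl (fun rows i =>
        if cond i then (rows.zip dataset).map (fun p => p.1 ++ [val p.2 i]) else rows)
      (dataset.map f)
    = dataset.map (fun row => L.foldl (fun dl i => if cond i then dl ++ [val row i] else dl) (f row)) := by
  induction L generalizing f with
  | nil => simp
  | cons i L ih =>
    simp only [List.foldl_cons]
    by_cases h : cond i
    · simp only [if_pos h, zip_map_self, List.map_map]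
      exact ih (fun row => f row ++ [val row i])
    · simp only [if_neg h]
      exact ih f

-- ===== VERDICT (by name: the statement is the Claim_ definition above) =====
theorem featureSelection_spec : Claim_equal_featureSelection := by
  intro start classColumn dataset chromosome _ _
  unfold Spec_featureSelection featureSelection featureSelection_alt
  dsimp only
  -- A side: outer loop over row indices becomes a fold over the rows, then a map
  rw [PySem.List.foldl_pyRange_zero_pyGetD' dataset []
    (fun acc row =>
      acc ++ [((PySem.List.pyRange 0 (chromosome.length : Int) 1).foldl (fun dl i =>
        if PySem.List.pyGetD chromosome i 0 = 1 then dl ++ [PySem.List.pyGetD row (start + i) 0] else dl) [])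
        ++ [PySem.List.pyGetD row classColumn 0]]) []]
  rw [PySem.List.foldl_append_singleton_eq_map]
  -- B side: commute the column-major fold into a per-row fold
  rw [col_major_eq dataset (fun i => PySem.List.pyGetD chromosome i 0 = 1)
    (fun row i => PySem.List.pyGetD row (start + i) 0)
    (PySem.List.pyRange 0 (chromosome.length : Int) 1) (fun _ => [])]
  rw [zip_map_self, List.map_map]
  simp [Function.comp]
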